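-- pv_equiv track=rewrite | github.com/LEEAHRI/Algorithm | Programmers/scat2.py | solution
-- ===== SOURCE A (Python) =====
-- from collections import Counter
--
-- def solution(grade):
-- 	def get_grade_counter(grade):
-- 		return Counter(grade)
--
-- 	def get_ranks_dict(grade):
-- 		counter = get_grade_counter(grade)
-- 		ranks_dict = {}
-- 		prev_sum = 1
-- 		for element in sorted(counter.keys(), reverse=True):
-- 			ranks_dict[element] = prev_sum
-- 			prev_sum += counter.get(element)
-- 		return ranks_dict
--
-- 	def get_answer(grade, ranks_dict):
-- 		return list(map(lambda item: ranks_dict[item], grade))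
--
-- 	ranks_dict = get_ranks_dict(grade)
-- 	return get_answer(grade, ranks_dict)
-- ===== SOURCE B (Python) =====
-- def solution(grade):
--     return [1 + sum(1 for x in grade if x > g) for g in grade]
-- ===== Notes on version B (the rewrite author's own statement) =====
-- stated objective: simpler
-- what changed: Replaced the Counter/sort/cumulative-rank-dict pipeline by a direct one-line comprehension: each rank is 1 plus the number of strictly greater elements.
import Mathlib
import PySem

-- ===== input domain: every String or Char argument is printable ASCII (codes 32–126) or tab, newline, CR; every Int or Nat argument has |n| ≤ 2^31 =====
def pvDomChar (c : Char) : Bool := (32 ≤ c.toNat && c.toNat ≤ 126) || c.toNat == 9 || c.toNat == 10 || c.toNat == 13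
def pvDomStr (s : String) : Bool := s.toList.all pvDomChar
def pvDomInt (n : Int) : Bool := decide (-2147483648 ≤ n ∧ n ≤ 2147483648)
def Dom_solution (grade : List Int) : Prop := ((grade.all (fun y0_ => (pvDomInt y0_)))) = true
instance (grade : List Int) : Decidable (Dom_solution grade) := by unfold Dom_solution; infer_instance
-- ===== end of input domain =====

-- B replaces A's Counter/sort/cumulative-rank-dict pipeline by a direct comprehension
-- (rank = 1 + number of strictly greater elements): simpler, same return value.

-- ===== PORT A =====
-- Counter(grade) is PySem.Dict.counter; sorted(counter.keys(), reverse=True) is PySem.List.sorted … true;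
-- the loop carries (ranks_dict, prev_sum). ranks_dict[item] is getD … 0, exact because every
-- item of grade is a key of ranks_dict (counter.get(element) likewise always hits a key).
def solution (grade : List Int) : List Int :=
  let counter : PySem.Dict Int Int := PySem.Dict.counter grade
  let st :=
    (PySem.List.sorted counter.keys (fun x => x) true).foldl
      (fun (st : PySem.Dict Int Int × Int) element =>
        (st.1.insert element st.2, st.2 + counter.getD element 0))
      (PySem.Dict.empty, 1)
  grade.map (fun item => st.1.getD item 0)

-- ===== PORT B =====
def solution_alt (grade : List Int) : List Int :=
  grade.map (fun g => 1 + ((grade.filter (fun x => decide (g < x))).length : Int))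

-- ===== PRECONDITION & SPEC =====
def Spec_solution (grade : List Int) (out : List Int) : Prop := out = solution_alt grade
instance (grade : List Int) (out : List Int) : Decidable (Spec_solution grade out) := by unfold Spec_solution; infer_instance

-- ===== CLAIM (what is proved, stated in full; the proofs are below) =====
def Claim_equal_solution : Prop := ∀ (grade : List Int), Dom_solution grade → Spec_solution grade (solution grade)

-- ===== LEMMAS AND PROOFS =====

-- after the ranks loop, keys not in the iterated list keep their old lookup
theorem pv_fold_notmem (c : Int → Int) (L : List Int) (g : Int) (hg : g ∉ L) :
    ∀ (d : PySem.Dict Int Int) (p : Int),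
      ((L.foldl (fun (st : PySem.Dict Int Int × Int) k => (st.1.insert k st.2, st.2 + c k)) (d, p)).1).getD g 0
        = d.getD g 0 := by
  induction L with
  | nil => intro d p; rfl
  | cons k t ih =>
      intro d p
      have hgk : g ≠ k := fun h => hg (h ▸ List.mem_cons_self ..)
      have hgt : g ∉ t := fun h => hg (List.mem_cons_of_mem _ h)
      simp only [List.foldl_cons]
      rw [ih hgt]
      exact PySem.Dict.getD_insert_of_ne d p 0 hgk

-- the rank stored at g is the start value plus the counts of the keys iterated before g
theorem pv_fold_mem (c : Int → Int) (L : List Int) (g : Int) :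
    L.Nodup → g ∈ L →
    ∀ (d : PySem.Dict Int Int) (p : Int),
      ((L.foldl (fun (st : PySem.Dict Int Int × Int) k => (st.1.insert k st.2, st.2 + c k)) (d, p)).1).getD g 0
        = p + ((L.takeWhile (fun k => k != g)).map c).sum := by
  induction L with
  | nil => intro _ h; cases h
  | cons k t ih =>
      intro hnd hg d p
      by_cases hk : k = g
      · subst hk
        have hgt : k ∉ t := (List.nodup_cons.mp hnd).1
        simp only [List.foldl_cons, List.takeWhile_cons, bne_self_eq_false, List.map_nil,
          List.sum_nil, if_false, Bool.false_eq_true]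
        rw [pv_fold_notmem c t k hgt, PySem.Dict.getD_insert_self]
        ring
      · have hgt : g ∈ t := by
          rcases List.mem_cons.mp hg with h | h
          · exact absurd h.symm hk
          · exact h
        have hbne : (k != g) = true := bne_iff_ne.mpr hk
        simp only [List.foldl_cons, List.takeWhile_cons, hbne, if_true, List.map_cons,
          List.sum_cons]
        rw [ih (List.nodup_cons.mp hnd).2 hgt]
        ring

-- on a strictly descending list the prefix before g is exactly the elements greater than g
theorem pv_takeWhile_desc (L : List Int) (g : Int) :
    L.Pairwise (· > ·) → g ∈ L →
    L.takeWhile (fun k => k != g) = L.filter (fun k => decide (g < k)) := by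
  induction L with
  | nil => intro _ h; cases h
  | cons k t ih =>
      intro hp hg
      rcases List.pairwise_cons.mp hp with ⟨hkgt, hpt⟩
      by_cases hk : k = g
      · subst hk
        have : t.filter (fun x => decide (k < x)) = [] := by
          rw [List.filter_eq_nil_iff]
          intro a ha
          simp only [decide_eq_true_eq]
          exact not_lt_of_gt (hkgt a ha)
        simp [this]
      · have hgt : g ∈ t := by
          rcases List.mem_cons.mp hg with h | h
          · exact absurd h.symm hk
          · exact h
        have hbne : (k != g) = true := bne_iff_ne.mpr hk
        have hglt : (decide (g < k)) = true := decide_eq_true (hkgt g hgt)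
        simp only [List.takeWhile_cons, hbne, if_true, List.filter_cons, hglt]
        rw [ih hpt hgt]

-- summing the multiplicities of the distinct values satisfying p counts the elements satisfying p
theorem pv_sum_counts (K : List Int) (hK : K.Nodup) (p : Int → Bool) (xs : List Int)
    (h : ∀ x ∈ xs, x ∈ K) :
    ((K.filter p).map (fun k => (xs.count k : Int))).sum = (xs.countP p : Int) := by
  induction xs with
  | nil => simp
  | cons x xs ih =>
      have hx : x ∈ K := h x (List.mem_cons_self ..)
      have hxs : ∀ y ∈ xs, y ∈ K := fun y hy => h y (List.mem_cons_of_mem _ hy)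
      have hcnt : ∀ k : Int, ((xs.count k + if x == k then 1 else 0 : Nat) : Int)
          = (xs.count k : Int) + (if k == x then (1 : Int) else 0) := by
        intro k
        by_cases hkx : k = x
        · subst hkx; simp
        · have h1 : (x == k) = false := beq_eq_false_iff_ne.mpr (Ne.symm hkx)
          have h2 : (k == x) = false := beq_eq_false_iff_ne.mpr hkx
          simp [h1, h2]
      simp only [List.count_cons, List.countP_cons]
      calc ((K.filter p).map (fun k => ((xs.count k + if x == k then 1 else 0 : Nat) : Int))).sum
          = ((K.filter p).map (fun k => (xs.count k : Int) + (if k == x then (1:Int) else 0))).sum := by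
            exact congrArg List.sum (List.map_congr_left (fun k _ => hcnt k))
        _ = ((K.filter p).map (fun k => (xs.count k : Int))).sum
              + ((K.filter p).map (fun k => if k == x then (1:Int) else 0)).sum := by
            exact PySem.List.sum_map_add_int _ _ _
        _ = (xs.countP p : Int) + (if p x then (1:Int) else 0) := by
            rw [ih hxs]
            congr 1
            rw [PySem.List.sum_map_ite_one_zero]
            by_cases hpx : p x = true
            · have : x ∈ K.filter p := List.mem_filter.mpr ⟨hx, hpx⟩
              rw [← List.count_eq_countP, List.count_eq_one_of_mem (hK.filter p) this]
              simp [hpx]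
            · have : x ∉ K.filter p := by
                intro hmem; exact hpx (List.mem_filter.mp hmem).2
              rw [← List.count_eq_countP, List.count_eq_zero_of_not_mem this]
              simp [hpx]
        _ = ((xs.countP p + if p x then 1 else 0 : Nat) : Int) := by
            split <;> push_cast <;> ring

theorem solution_point (grade : List Int) (g : Int) (hg : g ∈ grade) :
    let counter : PySem.Dict Int Int := PySem.Dict.counter grade
    ((((PySem.List.sorted counter.keys (fun x => x) true).foldl
        (fun (st : PySem.Dict Int Int × Int) element =>
          (st.1.insert element st.2, st.2 + counter.getD element 0))
        (PySem.Dict.empty, 1)).1).getD g 0)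
      = 1 + ((grade.filter (fun x => decide (g < x))).length : Int) := by
  intro counter
  set K : List Int := PySem.Set.ofList grade with hKdef
  have hkeys : counter.keys = K := PySem.Dict.keys_counter grade
  set L : List Int := PySem.List.sorted counter.keys (fun x => x) true with hLdef
  have hperm : L.Perm K := hkeys ▸ PySem.List.sorted_perm _ _ _
  have hKnd : K.Nodup := PySem.Set.nodup_ofList grade
  have hLnd : L.Nodup := hperm.nodup_iff.mpr hKnd
  have hgK : g ∈ K := by
    have : g ∈ PySem.Set.ofList grade := (PySem.Set.mem_ofList grade g).mpr hg
    exact this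
  have hgL : g ∈ L := hperm.mem_iff.mpr hgK
  have hpair : L.Pairwise (· > ·) := by
    have h1 : L.Pairwise (fun a b => a ≥ b) := by
      have := PySem.List.sorted_pairwise_rev counter.keys (fun x => x)
      exact this
    have h2 : L.Pairwise (· ≠ ·) := hLnd
    exact (h1.and h2).imp (fun {a b} hab => lt_of_le_of_ne hab.1.le (Ne.symm hab.2) |>.gt)
  rw [pv_fold_mem (fun k => counter.getD k 0) L g hLnd hgL,
      pv_takeWhile_desc L g hpair hgL]
  have hc : (L.filter (fun k => decide (g < k))).map (fun k => counter.getD k 0)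
      = (L.filter (fun k => decide (g < k))).map (fun k => (grade.count k : Int)) :=
    List.map_congr_left (fun k _ => PySem.Dict.getD_counter grade k)
  rw [hc]
  have hpermf : (L.filter (fun k => decide (g < k))).Perm (K.filter (fun k => decide (g < k))) :=
    hperm.filter _
  rw [(hpermf.map (fun k => (grade.count k : Int))).sum_eq]
  rw [pv_sum_counts K hKnd (fun k => decide (g < k)) grade (fun x hx => (PySem.Set.mem_ofList grade x).mpr hx)]
  rw [List.countP_eq_length_filter]

-- ===== VERDICT (by name: the statement is the Claim_ definition above) =====
theorem solution_spec : Claim_equal_solution := by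
  intro grade _
  unfold Spec_solution solution solution_alt
  exact List.map_congr_left (fun g hg => solution_point grade g hg)
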